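-- pv_equiv track=rewrite | github.com/umi1q/space | 4.py | count_programs
-- ===== SOURCE A (Python) =====
-- def count_programs(n):
--     if n == 1:
--         return 1
--     if n == 26:
--         return 0
--     if n < 1:
--         return 0
--     total_ways = count_programs(n - 1)
--     if (n - 1) % 2 == 0:
--         total_ways += count_programs((n - 1) // 2)
--     return total_ways
-- ===== SOURCE B (Python) =====
-- def count_programs(n):
--     # Bottom-up DP table over 1..n instead of overlapping recursion.
--     if n < 1:
--         return 0
--     t = [0, 1]  # t[0] unused placeholder, t[1] = 1
--     for k in range(2, n + 1):
--         if k == 26: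
--             v = 0
--         else:
--             v = t[k - 1]
--             if (k - 1) % 2 == 0:
--                 v += t[(k - 1) // 2]
--         t.append(v)
--     return t[n]
-- ===== Notes on version B (the rewrite author's own statement) =====
-- stated objective: faster
-- what changed: Replaces A's overlapping top-down recursion (f(n-1) plus f((n-1)//2)) by a bottom-up DP table filled once from 1 to n and indexed at the end.
import Mathlib
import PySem

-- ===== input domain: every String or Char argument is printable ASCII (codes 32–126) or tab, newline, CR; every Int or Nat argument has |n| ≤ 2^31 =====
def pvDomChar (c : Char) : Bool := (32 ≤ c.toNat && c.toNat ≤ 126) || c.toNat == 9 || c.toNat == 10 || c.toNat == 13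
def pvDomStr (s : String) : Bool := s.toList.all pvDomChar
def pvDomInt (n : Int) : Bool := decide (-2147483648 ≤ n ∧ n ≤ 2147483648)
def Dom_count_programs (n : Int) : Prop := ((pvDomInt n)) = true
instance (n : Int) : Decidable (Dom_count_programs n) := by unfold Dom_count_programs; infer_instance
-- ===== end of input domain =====

-- B replaces A's overlapping top-down recursion by a bottom-up DP table over 1..n (objective: faster, asymptotic).

-- ===== PORT A =====
def count_programs (n : Int) : Int :=
  if n = 1 then 1
  else if n = 26 then 0
  else if n < 1 then 0
  else
    count_programs (n - 1) +
      (if PySem.Int.mod (n - 1) 2 = 0 then count_programs (PySem.Int.floordiv (n - 1) 2) else 0)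
termination_by n.toNat
decreasing_by
  · omega
  · rw [PySem.Int.floordiv_eq_ediv_of_pos (by omega : (0:Int) < 2)]; omega

-- ===== PORT B =====
-- one loop iteration of Source B: append the value for index k to the table t
-- (the in-range list indexings t[k-1], t[(k-1)//2] are ported as pyGetD with default 0;
--  exact here because the indices are always in range, proved in the lemmas below)
def cpStep (t : List Int) (k : Int) : List Int :=
  let v :=
    if k = 26 then (0 : Int)
    else
      let v0 := PySem.List.pyGetD t (k - 1) 0
      if PySem.Int.mod (k - 1) 2 = 0 then v0 + PySem.List.pyGetD t (PySem.Int.floordiv (k - 1) 2) 0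
      else v0
  t ++ [v]

def count_programs_alt (n : Int) : Int :=
  if n < 1 then 0
  else
    let t := (PySem.List.pyRange 2 (n + 1) 1).foldl cpStep [0, 1]
    PySem.List.pyGetD t n 0

-- ===== PRECONDITION & SPEC =====
-- Pre_ excludes larger n: there A's deep recursive descent exceeds CPython's recursion
-- limit and A raises RecursionError instead of returning a value.
def Pre_count_programs (n : Int) : Prop := n ≤ 995
instance (n : Int) : Decidable (Pre_count_programs n) := by unfold Pre_count_programs; infer_instance
def pvWitness_count_programs : Int := (10)
def Spec_count_programs (n : Int) (out : Int) : Prop := out = count_programs_alt n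
instance (n : Int) (out : Int) : Decidable (Spec_count_programs n out) := by unfold Spec_count_programs; infer_instance

-- ===== CLAIM (what is proved, stated in full; the proofs are below) =====
def Claim_equal_count_programs : Prop := ∀ (n : Int), Dom_count_programs n → Pre_count_programs n → Spec_count_programs n (count_programs n)

-- ===== LEMMAS AND PROOFS =====

lemma cp_zero : count_programs 0 = 0 := by rw [count_programs]; norm_num
lemma cp_one : count_programs 1 = 1 := by rw [count_programs]; norm_num

lemma pyGetD_app_left (xs ys : List Int) (k : Int) (h0 : 0 ≤ k) (h : k < (xs.length : Int)) :
    PySem.List.pyGetD (xs ++ ys) k 0 = PySem.List.pyGetD xs k 0 := by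
  rw [PySem.List.pyGetD_eq_getElem _ _ h0 (by simp; omega),
      PySem.List.pyGetD_eq_getElem _ _ h0 h,
      List.getElem_append_left (by omega)]

lemma pyGetD_concat_len (xs : List Int) (v : Int) :
    PySem.List.pyGetD (xs ++ [v]) ((xs.length : Int)) 0 = v := by
  simp [PySem.List.pyGetD_natCast, List.getD_eq_getElem?_getD]

-- invariant of B's fold: the table has length n+1 and caches count_programs on 0..n
lemma tbl_spec (n : Int) (hn : 1 ≤ n) :
    ((PySem.List.pyRange 2 (n + 1) 1).foldl cpStep [0, 1]).length = (n + 1).toNat ∧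
    ∀ k : Int, 0 ≤ k → k ≤ n →
      PySem.List.pyGetD ((PySem.List.pyRange 2 (n + 1) 1).foldl cpStep [0, 1]) k 0 =
        count_programs k := by
  induction n, hn using Int.le_induction with
  | base =>
      rw [PySem.List.pyRange_one_eq_nil (by omega)]
      refine ⟨by decide, ?_⟩
      intro k hk0 hk1
      interval_cases k
      · rw [cp_zero]; decide
      · rw [cp_one]; decide
  | succ n hn ih =>
      obtain ⟨hlen, hget⟩ := ih
      have hsplit : PySem.List.pyRange 2 (n + 1 + 1) 1 =
          PySem.List.pyRange 2 (n + 1) 1 ++ [n + 1] :=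
        PySem.List.pyRange_one_succ_right (by omega)
      set T := (PySem.List.pyRange 2 (n + 1) 1).foldl cpStep [0, 1] with hT
      have hfold : (PySem.List.pyRange 2 (n + 1 + 1) 1).foldl cpStep [0, 1] = cpStep T (n + 1) := by
        rw [hsplit, List.foldl_append]; rfl
      have hdiv : PySem.Int.floordiv n 2 = n / 2 :=
        PySem.Int.floordiv_eq_ediv_of_pos (by omega)
      have h1 : (n + 1 - 1 : Int) = n := by ring
      have hval :
          (if (n + 1 : Int) = 26 then (0 : Int)
           else
             if PySem.Int.mod (n + 1 - 1) 2 = 0 then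
               PySem.List.pyGetD T (n + 1 - 1) 0 +
                 PySem.List.pyGetD T (PySem.Int.floordiv (n + 1 - 1) 2) 0
             else PySem.List.pyGetD T (n + 1 - 1) 0) = count_programs (n + 1) := by
        rw [count_programs]
        by_cases h26 : (n + 1 : Int) = 26
        · simp [h26]
        · rw [if_neg h26, if_neg (show ¬(n + 1 : Int) = 1 by omega), if_neg h26,
              if_neg (show ¬(n + 1 : Int) < 1 by omega)]
          rw [h1, hget n (by omega) (by omega), hdiv]
          by_cases hmod : PySem.Int.mod n 2 = 0
          · rw [if_pos hmod, if_pos hmod, hget (n / 2) (by omega) (by omega)]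
          · rw [if_neg hmod, if_neg hmod]; ring
      constructor
      · rw [hfold]
        simp only [cpStep, List.length_append, List.length_cons, List.length_nil]
        omega
      · intro k hk0 hk
        rw [hfold]
        rcases lt_or_eq_of_le hk with hklt | hkeq
        · simp only [cpStep]
          rw [pyGetD_app_left _ _ _ hk0 (by omega)]
          exact hget k hk0 (by omega)
        · subst hkeq
          simp only [cpStep]
          rw [show (n + 1 : Int) = ((T.length : Int)) from by rw [hlen]; omega] at *
          rw [pyGetD_concat_len]
          exact hval

-- ===== VERDICT (by name: the statement is the Claim_ definition above) =====
theorem count_programs_spec : Claim_equal_count_programs := by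
  intro n _ _
  unfold Spec_count_programs count_programs_alt
  by_cases h : n < 1
  · rw [count_programs]
    have h1 : ¬ n = 1 := by omega
    have h26 : ¬ n = 26 := by omega
    simp [h1, h26, h]
  · simp only [h, if_false]
    exact ((tbl_spec n (by omega)).2 n (by omega) (le_refl n)).symm
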